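-- pv_equiv track=rewrite | github.com/BellCordeiro/BellCordeiro | CriarNFT 3.py | tagolho
-- ===== SOURCE A (Python) =====
-- def tagolho(olhos):
--     olhos_looking_side=[1, 10, 11, 12, 13, 14, 15, 16, 17, 18, 19, 20, 21]
--     olhos_3_dot = [2, 22, 23, 24, 25, 26, 27, 28, 29, 30, 31, 32, 33]
--     olhos_4_dot =[3, 34, 35, 36, 37, 38, 39, 40, 41, 42, 43, 44, 45]
--     olhos_cute_1=[4, 46, 47, 48, 49, 50, 51, 52, 53, 54, 55, 56, 57]
--     olhos_standart_1 =[5, 58, 59, 60, 61, 62, 63, 64, 65, 66, 67, 68, 69]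
--     olhos_standart_2 =[6, 70, 71, 72, 73, 74, 75, 76, 77, 78, 79, 80, 81]
--     olhos_standart_3 =[7, 82, 83, 84, 85, 86, 87, 88, 89, 90, 91, 92, 93]
--     olhos_standart_4 =[8, 94, 95, 96, 97, 98, 99, 100, 101, 102, 103, 104, 105]
--     olhos_cute_2=[9,106, 107, 108, 109, 110, 111, 112, 113, 114, 115, 116, 117]
--     olhos_black1 = [118]
--     olhos_black2 = [119]
--     olhos_black3 = [120]
--     olhos_black4 = [121]
--     olhos_black5 = [122]
--     olhos_black6 = [123]
--
--     if(olhos == '0'):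
--             return ('eyes : none')
--     for ol in olhos_looking_side:
--         if olhos == str(ol):
--             return ('eyes : cat eyes')
--     for ol in olhos_3_dot:
--         if olhos == str(ol):
--             return ('eyes : 3 dot')
--     for ol in olhos_4_dot:
--         if olhos == str(ol):
--             return ('eyes : infinite')
--     for ol in olhos_cute_1:
--         if olhos == str(ol):
--             return ('eyes : shy')
--     for ol in olhos_standart_1:
--         if olhos == str(ol):
--             return ('eyes : lizard eyes')
--     for ol in olhos_standart_2:
--         if olhos == str(ol):
--             return ('eyes : eyelashes')
--     for ol in olhos_standart_3:
--         if olhos == str(ol):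
--             return ('eyes : rock')
--     for ol in olhos_standart_4:
--         if olhos == str(ol):
--             return ('eyes : alien eyes')
--     for ol in olhos_cute_2:
--         if olhos == str(ol):
--             return ('eyes : anime eyes')
--     for ol in olhos_black1:
--         if olhos == str(ol):
--             return ('eyes : uwu eyes')
--     for ol in olhos_black2:
--         if olhos == str(ol):
--             return ('eyes : confuse')
--     for ol in olhos_black3:
--         if olhos == str(ol):
--             return ('eyes : sleeping')
--     for ol in olhos_black4:
--         if olhos == str(ol):
--             return ('eyes : dead')
--     for ol in olhos_black5:
--         if olhos == str(ol):
--             return ('eyes : happy')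
--     for ol in olhos_black6:
--         if olhos == str(ol):
--             return ('eyes : myopic')
--
--     return('eyes : Não catalogado')
-- ===== SOURCE B (Python) =====
-- def tagolho(olhos):
--     groups = [
--         ([0], 'eyes : none'),
--         ([1, 10, 11, 12, 13, 14, 15, 16, 17, 18, 19, 20, 21], 'eyes : cat eyes'),
--         ([2, 22, 23, 24, 25, 26, 27, 28, 29, 30, 31, 32, 33], 'eyes : 3 dot'),
--         ([3, 34, 35, 36, 37, 38, 39, 40, 41, 42, 43, 44, 45], 'eyes : infinite'),
--         ([4, 46, 47, 48, 49, 50, 51, 52, 53, 54, 55, 56, 57], 'eyes : shy'),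
--         ([5, 58, 59, 60, 61, 62, 63, 64, 65, 66, 67, 68, 69], 'eyes : lizard eyes'),
--         ([6, 70, 71, 72, 73, 74, 75, 76, 77, 78, 79, 80, 81], 'eyes : eyelashes'),
--         ([7, 82, 83, 84, 85, 86, 87, 88, 89, 90, 91, 92, 93], 'eyes : rock'),
--         ([8, 94, 95, 96, 97, 98, 99, 100, 101, 102, 103, 104, 105], 'eyes : alien eyes'),
--         ([9, 106, 107, 108, 109, 110, 111, 112, 113, 114, 115, 116, 117], 'eyes : anime eyes'),
--         ([118], 'eyes : uwu eyes'),
--         ([119], 'eyes : confuse'),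
--         ([120], 'eyes : sleeping'),
--         ([121], 'eyes : dead'),
--         ([122], 'eyes : happy'),
--         ([123], 'eyes : myopic'),
--     ]
--     table = {str(n): label for ids, label in groups for n in ids}
--     return table.get(olhos, 'eyes : Não catalogado')
-- ===== Notes on version B (the rewrite author's own statement) =====
-- stated objective: idiomatic
-- what changed: The special-case check plus 16 sequential linear scans over id lists (with str() inside each inner loop) are replaced by one dict built once from (ids, label) groups and a single table.get(olhos, default) lookup with no loops in the lookup path.
import Mathlib
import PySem

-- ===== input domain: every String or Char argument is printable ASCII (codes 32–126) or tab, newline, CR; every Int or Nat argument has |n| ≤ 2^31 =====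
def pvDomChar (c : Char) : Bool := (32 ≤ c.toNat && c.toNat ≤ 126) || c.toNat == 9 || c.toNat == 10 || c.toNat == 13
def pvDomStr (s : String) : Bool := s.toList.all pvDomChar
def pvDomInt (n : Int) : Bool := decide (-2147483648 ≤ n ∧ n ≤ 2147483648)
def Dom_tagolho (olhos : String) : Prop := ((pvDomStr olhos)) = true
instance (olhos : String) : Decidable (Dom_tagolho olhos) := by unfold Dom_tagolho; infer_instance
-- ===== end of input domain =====

-- B builds the id→label table once and does a single lookup instead of A's 16 sequential scans (idiomatic rewrite; return value proved equal).
-- ===== PORT A =====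
-- each `for ol in lst: if olhos == str(ol): return label` loop of A
def pvScan (olhos label : String) : List Int → Option String
  | [] => none
  | ol :: t => if olhos == PySem.Int.toStr ol then some label else pvScan olhos label t

def tagolho (olhos : String) : String :=
  if olhos == "0" then "eyes : none" else
  match pvScan olhos "eyes : cat eyes" ([1, 10, 11, 12, 13, 14, 15, 16, 17, 18, 19, 20, 21] : List Int) with
  | some r => r
  | none =>
  match pvScan olhos "eyes : 3 dot" ([2, 22, 23, 24, 25, 26, 27, 28, 29, 30, 31, 32, 33] : List Int) with
  | some r => r
  | none =>
  match pvScan olhos "eyes : infinite" ([3, 34, 35, 36, 37, 38, 39, 40, 41, 42, 43, 44, 45] : List Int) with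
  | some r => r
  | none =>
  match pvScan olhos "eyes : shy" ([4, 46, 47, 48, 49, 50, 51, 52, 53, 54, 55, 56, 57] : List Int) with
  | some r => r
  | none =>
  match pvScan olhos "eyes : lizard eyes" ([5, 58, 59, 60, 61, 62, 63, 64, 65, 66, 67, 68, 69] : List Int) with
  | some r => r
  | none =>
  match pvScan olhos "eyes : eyelashes" ([6, 70, 71, 72, 73, 74, 75, 76, 77, 78, 79, 80, 81] : List Int) with
  | some r => r
  | none =>
  match pvScan olhos "eyes : rock" ([7, 82, 83, 84, 85, 86, 87, 88, 89, 90, 91, 92, 93] : List Int) with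
  | some r => r
  | none =>
  match pvScan olhos "eyes : alien eyes" ([8, 94, 95, 96, 97, 98, 99, 100, 101, 102, 103, 104, 105] : List Int) with
  | some r => r
  | none =>
  match pvScan olhos "eyes : anime eyes" ([9, 106, 107, 108, 109, 110, 111, 112, 113, 114, 115, 116, 117] : List Int) with
  | some r => r
  | none =>
  match pvScan olhos "eyes : uwu eyes" ([118] : List Int) with
  | some r => r
  | none =>
  match pvScan olhos "eyes : confuse" ([119] : List Int) with
  | some r => r
  | none =>
  match pvScan olhos "eyes : sleeping" ([120] : List Int) with
  | some r => r
  | none =>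
  match pvScan olhos "eyes : dead" ([121] : List Int) with
  | some r => r
  | none =>
  match pvScan olhos "eyes : happy" ([122] : List Int) with
  | some r => r
  | none =>
  match pvScan olhos "eyes : myopic" ([123] : List Int) with
  | some r => r
  | none =>
  "eyes : Não catalogado"

-- ===== PORT B =====
def pvGroups : List (List Int × String) := [
    (([0] : List Int), "eyes : none"),
    (([1, 10, 11, 12, 13, 14, 15, 16, 17, 18, 19, 20, 21] : List Int), "eyes : cat eyes"),
    (([2, 22, 23, 24, 25, 26, 27, 28, 29, 30, 31, 32, 33] : List Int), "eyes : 3 dot"),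
    (([3, 34, 35, 36, 37, 38, 39, 40, 41, 42, 43, 44, 45] : List Int), "eyes : infinite"),
    (([4, 46, 47, 48, 49, 50, 51, 52, 53, 54, 55, 56, 57] : List Int), "eyes : shy"),
    (([5, 58, 59, 60, 61, 62, 63, 64, 65, 66, 67, 68, 69] : List Int), "eyes : lizard eyes"),
    (([6, 70, 71, 72, 73, 74, 75, 76, 77, 78, 79, 80, 81] : List Int), "eyes : eyelashes"),
    (([7, 82, 83, 84, 85, 86, 87, 88, 89, 90, 91, 92, 93] : List Int), "eyes : rock"),
    (([8, 94, 95, 96, 97, 98, 99, 100, 101, 102, 103, 104, 105] : List Int), "eyes : alien eyes"),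
    (([9, 106, 107, 108, 109, 110, 111, 112, 113, 114, 115, 116, 117] : List Int), "eyes : anime eyes"),
    (([118] : List Int), "eyes : uwu eyes"),
    (([119] : List Int), "eyes : confuse"),
    (([120] : List Int), "eyes : sleeping"),
    (([121] : List Int), "eyes : dead"),
    (([122] : List Int), "eyes : happy"),
    (([123] : List Int), "eyes : myopic")]

-- table = {str(n): label for ids, label in groups for n in ids}
def pvTable : PySem.Dict String String :=
  PySem.Dict.ofList (pvGroups.flatMap (fun g => g.1.map (fun n => (PySem.Int.toStr n, g.2))))

def tagolho_alt (olhos : String) : String :=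
  pvTable.getD olhos "eyes : Não catalogado"

-- ===== PRECONDITION & SPEC =====
def Spec_tagolho (olhos : String) (out : String) : Prop := out = tagolho_alt olhos
instance (olhos : String) (out : String) : Decidable (Spec_tagolho olhos out) := by unfold Spec_tagolho; infer_instance

-- ===== CLAIM (what is proved, stated in full; the proofs are below) =====
def Claim_equal_tagolho : Prop := ∀ (olhos : String), Dom_tagolho olhos → Spec_tagolho olhos (tagolho olhos)

-- ===== LEMMAS AND PROOFS =====
-- every key string either program can hit: "0" … "123"
def pvKeys : List String := (List.range 124).map (fun n => PySem.Int.toStr (n : Int))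

-- the table B builds, written out as its literal items list (proof helper)
def pvItemsLit : List (String × String) := [("0", "eyes : none"),
    ("1", "eyes : cat eyes"),
    ("10", "eyes : cat eyes"),
    ("11", "eyes : cat eyes"),
    ("12", "eyes : cat eyes"),
    ("13", "eyes : cat eyes"),
    ("14", "eyes : cat eyes"),
    ("15", "eyes : cat eyes"),
    ("16", "eyes : cat eyes"),
    ("17", "eyes : cat eyes"),
    ("18", "eyes : cat eyes"),
    ("19", "eyes : cat eyes"),
    ("20", "eyes : cat eyes"),
    ("21", "eyes : cat eyes"),
    ("2", "eyes : 3 dot"),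
    ("22", "eyes : 3 dot"),
    ("23", "eyes : 3 dot"),
    ("24", "eyes : 3 dot"),
    ("25", "eyes : 3 dot"),
    ("26", "eyes : 3 dot"),
    ("27", "eyes : 3 dot"),
    ("28", "eyes : 3 dot"),
    ("29", "eyes : 3 dot"),
    ("30", "eyes : 3 dot"),
    ("31", "eyes : 3 dot"),
    ("32", "eyes : 3 dot"),
    ("33", "eyes : 3 dot"),
    ("3", "eyes : infinite"),
    ("34", "eyes : infinite"),
    ("35", "eyes : infinite"),
    ("36", "eyes : infinite"),
    ("37", "eyes : infinite"),
    ("38", "eyes : infinite"),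
    ("39", "eyes : infinite"),
    ("40", "eyes : infinite"),
    ("41", "eyes : infinite"),
    ("42", "eyes : infinite"),
    ("43", "eyes : infinite"),
    ("44", "eyes : infinite"),
    ("45", "eyes : infinite"),
    ("4", "eyes : shy"),
    ("46", "eyes : shy"),
    ("47", "eyes : shy"),
    ("48", "eyes : shy"),
    ("49", "eyes : shy"),
    ("50", "eyes : shy"),
    ("51", "eyes : shy"),
    ("52", "eyes : shy"),
    ("53", "eyes : shy"),
    ("54", "eyes : shy"),
    ("55", "eyes : shy"),
    ("56", "eyes : shy"),
    ("57", "eyes : shy"),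
    ("5", "eyes : lizard eyes"),
    ("58", "eyes : lizard eyes"),
    ("59", "eyes : lizard eyes"),
    ("60", "eyes : lizard eyes"),
    ("61", "eyes : lizard eyes"),
    ("62", "eyes : lizard eyes"),
    ("63", "eyes : lizard eyes"),
    ("64", "eyes : lizard eyes"),
    ("65", "eyes : lizard eyes"),
    ("66", "eyes : lizard eyes"),
    ("67", "eyes : lizard eyes"),
    ("68", "eyes : lizard eyes"),
    ("69", "eyes : lizard eyes"),
    ("6", "eyes : eyelashes"),
    ("70", "eyes : eyelashes"),
    ("71", "eyes : eyelashes"),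
    ("72", "eyes : eyelashes"),
    ("73", "eyes : eyelashes"),
    ("74", "eyes : eyelashes"),
    ("75", "eyes : eyelashes"),
    ("76", "eyes : eyelashes"),
    ("77", "eyes : eyelashes"),
    ("78", "eyes : eyelashes"),
    ("79", "eyes : eyelashes"),
    ("80", "eyes : eyelashes"),
    ("81", "eyes : eyelashes"),
    ("7", "eyes : rock"),
    ("82", "eyes : rock"),
    ("83", "eyes : rock"),
    ("84", "eyes : rock"),
    ("85", "eyes : rock"),
    ("86", "eyes : rock"),
    ("87", "eyes : rock"),
    ("88", "eyes : rock"),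
    ("89", "eyes : rock"),
    ("90", "eyes : rock"),
    ("91", "eyes : rock"),
    ("92", "eyes : rock"),
    ("93", "eyes : rock"),
    ("8", "eyes : alien eyes"),
    ("94", "eyes : alien eyes"),
    ("95", "eyes : alien eyes"),
    ("96", "eyes : alien eyes"),
    ("97", "eyes : alien eyes"),
    ("98", "eyes : alien eyes"),
    ("99", "eyes : alien eyes"),
    ("100", "eyes : alien eyes"),
    ("101", "eyes : alien eyes"),
    ("102", "eyes : alien eyes"),
    ("103", "eyes : alien eyes"),
    ("104", "eyes : alien eyes"),
    ("105", "eyes : alien eyes"),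
    ("9", "eyes : anime eyes"),
    ("106", "eyes : anime eyes"),
    ("107", "eyes : anime eyes"),
    ("108", "eyes : anime eyes"),
    ("109", "eyes : anime eyes"),
    ("110", "eyes : anime eyes"),
    ("111", "eyes : anime eyes"),
    ("112", "eyes : anime eyes"),
    ("113", "eyes : anime eyes"),
    ("114", "eyes : anime eyes"),
    ("115", "eyes : anime eyes"),
    ("116", "eyes : anime eyes"),
    ("117", "eyes : anime eyes"),
    ("118", "eyes : uwu eyes"),
    ("119", "eyes : confuse"),
    ("120", "eyes : sleeping"),
    ("121", "eyes : dead"),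
    ("122", "eyes : happy"),
    ("123", "eyes : myopic")]

set_option maxRecDepth 10000 in
theorem pvTable_eq : pvTable = PySem.Dict.mk pvItemsLit := by decide

theorem pvScan_none (olhos label : String) (xs : List Int)
    (h : olhos ∉ pvKeys) (hx : ∀ ol ∈ xs, PySem.Int.toStr ol ∈ pvKeys) :
    pvScan olhos label xs = none := by
  induction xs with
  | nil => rfl
  | cons ol t ih =>
    have hne : (olhos == PySem.Int.toStr ol) = false := by
      simp only [beq_eq_false_iff_ne, ne_eq]
      intro he; exact h (he ▸ hx ol (by simp))
    simp [pvScan, hne, ih (fun o ho => hx o (List.mem_cons_of_mem _ ho))]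

set_option maxRecDepth 10000 in
theorem pv_agree_on_keys : ∀ s ∈ pvKeys, tagolho s = (PySem.Dict.mk pvItemsLit).getD s "eyes : Não catalogado" := by decide

set_option maxRecDepth 10000 in
theorem pv_keys_table : ∀ k ∈ pvTable.keys, k ∈ pvKeys := by rw [pvTable_eq]; decide

set_option maxRecDepth 10000 in
theorem pvA_default (olhos : String) (h : olhos ∉ pvKeys) :
    tagolho olhos = "eyes : Não catalogado" := by
  have h0 : (olhos == "0") = false := by
    simp only [beq_eq_false_iff_ne, ne_eq]
    intro he; exact h (he ▸ (by decide : ("0" : String) ∈ pvKeys))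
  unfold tagolho
  rw [pvScan_none olhos "eyes : cat eyes" ([1, 10, 11, 12, 13, 14, 15, 16, 17, 18, 19, 20, 21] : List Int) h (by decide)]
  rw [pvScan_none olhos "eyes : 3 dot" ([2, 22, 23, 24, 25, 26, 27, 28, 29, 30, 31, 32, 33] : List Int) h (by decide)]
  rw [pvScan_none olhos "eyes : infinite" ([3, 34, 35, 36, 37, 38, 39, 40, 41, 42, 43, 44, 45] : List Int) h (by decide)]
  rw [pvScan_none olhos "eyes : shy" ([4, 46, 47, 48, 49, 50, 51, 52, 53, 54, 55, 56, 57] : List Int) h (by decide)]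
  rw [pvScan_none olhos "eyes : lizard eyes" ([5, 58, 59, 60, 61, 62, 63, 64, 65, 66, 67, 68, 69] : List Int) h (by decide)]
  rw [pvScan_none olhos "eyes : eyelashes" ([6, 70, 71, 72, 73, 74, 75, 76, 77, 78, 79, 80, 81] : List Int) h (by decide)]
  rw [pvScan_none olhos "eyes : rock" ([7, 82, 83, 84, 85, 86, 87, 88, 89, 90, 91, 92, 93] : List Int) h (by decide)]
  rw [pvScan_none olhos "eyes : alien eyes" ([8, 94, 95, 96, 97, 98, 99, 100, 101, 102, 103, 104, 105] : List Int) h (by decide)]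
  rw [pvScan_none olhos "eyes : anime eyes" ([9, 106, 107, 108, 109, 110, 111, 112, 113, 114, 115, 116, 117] : List Int) h (by decide)]
  rw [pvScan_none olhos "eyes : uwu eyes" ([118] : List Int) h (by decide)]
  rw [pvScan_none olhos "eyes : confuse" ([119] : List Int) h (by decide)]
  rw [pvScan_none olhos "eyes : sleeping" ([120] : List Int) h (by decide)]
  rw [pvScan_none olhos "eyes : dead" ([121] : List Int) h (by decide)]
  rw [pvScan_none olhos "eyes : happy" ([122] : List Int) h (by decide)]
  rw [pvScan_none olhos "eyes : myopic" ([123] : List Int) h (by decide)]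
  simp [h0]

theorem pvB_default (olhos : String) (h : olhos ∉ pvKeys) :
    tagolho_alt olhos = "eyes : Não catalogado" := by
  have hk : olhos ∉ pvTable.keys := fun hm => h (pv_keys_table olhos hm)
  have hc : pvTable.contains olhos = false := by
    cases hcb : pvTable.contains olhos with
    | false => rfl
    | true => exact absurd ((PySem.Dict.contains_iff_mem_keys pvTable olhos).mp hcb) hk
  exact PySem.Dict.getD_of_not_contains pvTable _ hc

-- ===== VERDICT (by name: the statement is the Claim_ definition above) =====
theorem tagolho_spec : Claim_equal_tagolho := by
  intro olhos _
  unfold Spec_tagolho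
  by_cases h : olhos ∈ pvKeys
  · unfold tagolho_alt
    rw [pvTable_eq]
    exact pv_agree_on_keys olhos h
  · rw [pvA_default olhos h, pvB_default olhos h]
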